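-- pv_equiv track=rewrite | github.com/ashna-verma/Quine-McKlusky | mcpussy.py | group_implicants_by_num_ones
-- ===== SOURCE A (Python) =====
-- def group_implicants_by_num_ones(implicants):
--     groups = {}
--     for implicant in implicants:
--         num_ones = implicant.count('1')
--         if num_ones in groups:
--             groups[num_ones].append(implicant)
--         else:
--             groups[num_ones] = [implicant]
--     return groups
-- ===== SOURCE B (Python) =====
-- def group_implicants_by_num_ones(implicants):
--     counts = [s.count('1') for s in implicants]
--     keys = list(dict.fromkeys(counts))
--     return {k: [s for s, c in zip(implicants, counts) if c == k]
--             for k in keys}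
-- ===== Notes on version B (the rewrite author's own statement) =====
-- stated objective: alternative
-- what changed: Instead of one pass that mutates per-key lists inside a dict, B precomputes all one-counts, dedups them into the ordered key list, and builds the result with a dict comprehension that filters the zipped input once per distinct key.
import Mathlib
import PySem

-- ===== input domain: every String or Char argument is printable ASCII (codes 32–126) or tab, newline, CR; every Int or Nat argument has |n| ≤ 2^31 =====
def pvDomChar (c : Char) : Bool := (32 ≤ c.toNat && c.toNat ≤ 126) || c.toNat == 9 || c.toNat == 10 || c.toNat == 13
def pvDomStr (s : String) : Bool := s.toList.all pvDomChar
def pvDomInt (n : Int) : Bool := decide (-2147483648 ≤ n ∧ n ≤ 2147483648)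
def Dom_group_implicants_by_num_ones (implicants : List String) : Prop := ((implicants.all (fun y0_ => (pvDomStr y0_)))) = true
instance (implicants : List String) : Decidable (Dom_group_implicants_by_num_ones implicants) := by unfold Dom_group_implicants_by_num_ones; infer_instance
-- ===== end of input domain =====

-- B replaces A's single mutating pass with "count, dedup keys, then one filter per distinct key"; same return value, alternative decomposition.

-- ===== PORT A =====
def group_implicants_by_num_ones (implicants : List String) : List (Int × List String) :=
  (implicants.foldl
    (fun groups implicant =>
      let num_ones : Int := (PySem.Str.count implicant "1" : Int)
      if groups.contains num_ones then
        groups.modify num_ones [] (fun v => v ++ [implicant])   -- groups[num_ones].append(implicant)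
      else
        groups.insert num_ones [implicant])
    PySem.Dict.empty).items

-- ===== PORT B =====
def group_implicants_by_num_ones_alt (implicants : List String) : List (Int × List String) :=
  let counts : List Int := implicants.map (fun s => (PySem.Str.count s "1" : Int))
  let keys : List Int := PySem.List.dedup counts                 -- list(dict.fromkeys(counts))
  keys.map (fun k =>
    (k, ((implicants.zip counts).filter (fun p => p.2 == k)).map (fun p => p.1)))

-- ===== PRECONDITION & SPEC =====
def Spec_group_implicants_by_num_ones (implicants : List String) (out : List (Int × List String)) : Prop := out = group_implicants_by_num_ones_alt implicants
instance (implicants : List String) (out : List (Int × List String)) : Decidable (Spec_group_implicants_by_num_ones implicants out) := by unfold Spec_group_implicants_by_num_ones; infer_instance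

-- ===== CLAIM (what is proved, stated in full; the proofs are below) =====
def Claim_equal_group_implicants_by_num_ones : Prop := ∀ (implicants : List String), Dom_group_implicants_by_num_ones implicants → Spec_group_implicants_by_num_ones implicants (group_implicants_by_num_ones implicants)

-- ===== LEMMAS AND PROOFS =====

-- A's two branches are both "modify with default []".
theorem pv_stepA_eq (g : PySem.Dict Int (List String)) (s : String) :
    (if g.contains ((PySem.Str.count s "1" : Int)) then
       g.modify ((PySem.Str.count s "1" : Int)) [] (fun v => v ++ [s])
     else g.insert ((PySem.Str.count s "1" : Int)) [s])
    = g.modify ((PySem.Str.count s "1" : Int)) [] (fun v => v ++ [s]) := by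
  by_cases h : g.contains ((PySem.Str.count s "1" : Int)) = true
  · rw [if_pos h]
  · rw [if_neg h]
    simp only [Bool.not_eq_true] at h
    unfold PySem.Dict.modify
    rw [PySem.Dict.getD_of_not_contains _ _ h]
    simp

theorem pv_contains_eq (d : PySem.Dict Int (List String)) (k : Int) :
    PySem.Set.contains d.keys k = d.contains k := by
  rw [PySem.Dict.contains_eq_decide_mem_keys]
  simp [PySem.Set.contains]

-- keys of the grouping fold are the first-occurrence set of the keys seen
theorem pv_keys_fold (l : List (Int × String)) (d : PySem.Dict Int (List String)) :
    (l.foldl (fun d p => d.modify p.1 [] (fun v => v ++ [p.2])) d).keys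
      = (l.map (fun p => p.1)).foldl PySem.Set.add d.keys := by
  induction l generalizing d with
  | nil => rfl
  | cons p t ih =>
    simp only [List.foldl_cons, List.map_cons]
    rw [ih]
    have hk : (d.modify p.1 [] (fun v => v ++ [p.2])).keys = PySem.Set.add d.keys p.1 := by
      rw [PySem.Dict.keys_modify]
      unfold PySem.Set.add
      rw [pv_contains_eq]
      by_cases h : d.contains p.1 = true
      · rw [PySem.Dict.keys_insert_of_contains _ _ h, if_pos h]
      · simp only [Bool.not_eq_true] at h
        rw [PySem.Dict.keys_insert_of_not_contains _ _ h, if_neg (by simp [h])]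
    rw [hk]

-- a dict with nodup keys is its keys decorated with their values
theorem pv_items_eq_keys_map {κ ν : Type} [BEq κ] [LawfulBEq κ]
    (l : List (κ × ν)) (d0 : ν) (h : ((PySem.Dict.mk l : PySem.Dict κ ν)).keys.Nodup) :
    (PySem.Dict.mk l : PySem.Dict κ ν).items
      = (PySem.Dict.mk l : PySem.Dict κ ν).keys.map (fun k => (k, (PySem.Dict.mk l : PySem.Dict κ ν).getD k d0)) := by
  induction l with
  | nil => rfl
  | cons kv t ih =>
    have hkeys : (PySem.Dict.mk (kv :: t) : PySem.Dict κ ν).keys = kv.1 :: (PySem.Dict.mk t : PySem.Dict κ ν).keys := rfl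
    have hitems : (PySem.Dict.mk (kv :: t) : PySem.Dict κ ν).items = kv :: (PySem.Dict.mk t : PySem.Dict κ ν).items := rfl
    rw [hkeys] at h
    have hnd := h.of_cons
    have hnm : kv.1 ∉ (PySem.Dict.mk t : PySem.Dict κ ν).keys := (List.nodup_cons.mp h).1
    rw [hitems, hkeys, List.map_cons]
    congr 1
    · have hgd : (PySem.Dict.mk (kv :: t) : PySem.Dict κ ν).getD kv.1 d0 = kv.2 := by
        rw [PySem.Dict.getD_eq_get?_getD, PySem.Dict.get?_mk_cons]
        simp
      rw [hgd]
    · rw [ih hnd]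
      apply List.map_congr_left
      intro k hkmem
      have hne : (kv.1 == k) = false := by
        apply beq_eq_false_iff_ne.mpr
        intro he; exact hnm (he ▸ hkmem)
      have hgd : (PySem.Dict.mk (kv :: t) : PySem.Dict κ ν).getD k d0
          = (PySem.Dict.mk t : PySem.Dict κ ν).getD k d0 := by
        rw [PySem.Dict.getD_eq_get?_getD, PySem.Dict.get?_mk_cons, hne]
        simp [PySem.Dict.getD_eq_get?_getD]
      rw [hgd]

-- ===== VERDICT (by name: the statement is the Claim_ definition above) =====
theorem group_implicants_by_num_ones_spec : Claim_equal_group_implicants_by_num_ones := by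
  intro implicants _
  unfold Spec_group_implicants_by_num_ones group_implicants_by_num_ones group_implicants_by_num_ones_alt
  simp only []
  -- name the count function and the decorated list
  set c : String → Int := fun s => (PySem.Str.count s "1" : Int) with hc
  have hstep : (fun (groups : PySem.Dict Int (List String)) implicant =>
      let num_ones : Int := (PySem.Str.count implicant "1" : Int)
      if groups.contains num_ones then
        groups.modify num_ones [] (fun v => v ++ [implicant])
      else groups.insert num_ones [implicant])
      = fun groups implicant => groups.modify (c implicant) [] (fun v => v ++ [implicant]) := by
    funext g s; exact pv_stepA_eq g s
  rw [hstep]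
  -- fold over the (key, string) pairs
  have hmap : implicants.foldl (fun g s => g.modify (c s) [] (fun v => v ++ [s])) PySem.Dict.empty
      = (implicants.map (fun s => (c s, s))).foldl
          (fun d p => d.modify p.1 [] (fun v => v ++ [p.2])) PySem.Dict.empty := by
    rw [List.foldl_map]
  rw [hmap]
  set l : List (Int × String) := implicants.map (fun s => (c s, s)) with hl
  set D : PySem.Dict Int (List String) :=
    l.foldl (fun d p => d.modify p.1 [] (fun v => v ++ [p.2])) PySem.Dict.empty with hD
  have hkeys : D.keys = PySem.Set.ofList (implicants.map c) := by
    rw [hD, pv_keys_fold]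
    have : l.map (fun p => p.1) = implicants.map c := by
      rw [hl, List.map_map]; rfl
    rw [this]
    rfl
  have hnd : D.keys.Nodup := by rw [hkeys]; exact PySem.Set.nodup_ofList _
  have hgetD : ∀ k : Int, D.getD k [] = (l.filter (fun p => p.1 == k)).map (fun p => p.2) := by
    intro k
    rw [hD, PySem.Dict.getD_foldl_modify_append]
    simp
  -- items = keys decorated with values
  obtain ⟨dl⟩ := D
  have hitems := pv_items_eq_keys_map dl ([] : List String) hnd
  rw [hitems]
  -- B's side: keys are the same list
  have hdedup : PySem.List.dedup (implicants.map c) = PySem.Set.ofList (implicants.map c) :=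
    PySem.List.dedup_eq_ofList _
  rw [hdedup, ← hkeys]
  -- pointwise equality of the decorations
  apply List.map_congr_left
  intro k _
  have hzip : ∀ (xs : List String), xs.zip (xs.map c) = xs.map (fun s => (s, c s)) := by
    intro xs
    induction xs with
    | nil => rfl
    | cons a t ih => simp [ih]
  rw [hgetD k, hzip implicants]
  rw [hl]
  rw [List.filter_map, List.filter_map, List.map_map, List.map_map]
  simp [Function.comp_def]
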